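-- pv_equiv track=rewrite | github.com/johnmichaelwebb/sleep-code | MAPseq/LocalResources/MAPseqProcessing.py | singleAreaConnectivitySingle
-- ===== SOURCE A (Python) =====
-- def singleAreaConnectivitySingle(currProjection, a):
--     ## create heatmap for one region
--     total = []
--     for i in range(len(currProjection)):
--         single_neuron = []
--         for j in range(len(a)):
--             if currProjection[i] in a[j]:
--                 single_neuron.append(1)
--             else:
--                 single_neuron.append(0)
--         total.append(single_neuron)
--     return total
-- ===== SOURCE B (Python) =====
-- def singleAreaConnectivitySingle(currProjection, a):
--     ## create heatmap for one region: inverted index, then scatter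
--     index = {}
--     for j, region in enumerate(a):
--         for v in region:
--             index.setdefault(v, set()).add(j)
--     n = len(a)
--     total = []
--     for v in currProjection:
--         row = [0] * n
--         for j in index.get(v, ()):
--             row[j] = 1
--         total.append(row)
--     return total
-- ===== Notes on version B (the rewrite author's own statement) =====
-- stated objective: faster
-- what changed: Replaces the per-value scan over every region with a prebuilt inverted index (value -> set of region indices) and scatters 1s into zero rows.
import Mathlib
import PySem

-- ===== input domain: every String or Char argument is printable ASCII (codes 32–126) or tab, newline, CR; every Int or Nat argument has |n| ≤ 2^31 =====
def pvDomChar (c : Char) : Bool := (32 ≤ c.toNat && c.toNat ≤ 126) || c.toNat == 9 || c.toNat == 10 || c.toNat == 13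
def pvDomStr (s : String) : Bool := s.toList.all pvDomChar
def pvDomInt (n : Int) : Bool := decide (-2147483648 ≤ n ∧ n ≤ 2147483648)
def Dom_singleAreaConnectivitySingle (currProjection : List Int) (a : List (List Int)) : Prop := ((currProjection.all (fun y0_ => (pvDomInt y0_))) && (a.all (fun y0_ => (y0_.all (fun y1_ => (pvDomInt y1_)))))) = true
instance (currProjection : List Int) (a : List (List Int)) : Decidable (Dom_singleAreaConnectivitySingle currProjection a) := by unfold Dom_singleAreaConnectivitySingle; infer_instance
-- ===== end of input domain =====

-- B replaces A's per-value scan over every region with a prebuilt inverted index (value → set of region indices) scattered into zero rows; objective: faster.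


-- ===== PORT A =====
-- for i in range(len(currProjection)): for j in range(len(a)): append 1/0 by membership test
def singleAreaConnectivitySingle (currProjection : List Int) (a : List (List Int)) : List (List Int) :=
  (PySem.List.pyRange 0 (currProjection.length : Int) 1).foldl (fun total i =>
    let single_neuron :=
      (PySem.List.pyRange 0 (a.length : Int) 1).foldl (fun sn j =>
        if PySem.List.pyGetD currProjection i 0 ∈ PySem.List.pyGetD a j [] then sn ++ [(1 : Int)]
        else sn ++ [(0 : Int)]) []
    total ++ [single_neuron]) []

-- ===== PORT B =====
-- index = {}; for j, region in enumerate(a): for v in region: index.setdefault(v, set()).add(j)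
def pvBuildIndex (a : List (List Int)) : PySem.Dict Int (PySem.Set Int) :=
  (PySem.List.enumerate a 0).foldl (fun d p =>
    p.2.foldl (fun d v => d.insert v (PySem.Set.add (d.getD v PySem.Set.empty) p.1)) d)
    PySem.Dict.empty

-- row = [0]*n; for j in index.get(v, ()): row[j] = 1; total.append(row)
def singleAreaConnectivitySingle_alt (currProjection : List Int) (a : List (List Int)) : List (List Int) :=
  let index := pvBuildIndex a
  let n := a.length
  currProjection.foldl (fun total v =>
    let row := (index.getD v PySem.Set.empty).foldl
      (fun row j => PySem.List.pySetD row j 1) (List.replicate n (0 : Int))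
    total ++ [row]) []

-- ===== PRECONDITION & SPEC =====
def Spec_singleAreaConnectivitySingle (currProjection : List Int) (a : List (List Int)) (out : List (List Int)) : Prop := out = singleAreaConnectivitySingle_alt currProjection a
instance (currProjection : List Int) (a : List (List Int)) (out : List (List Int)) : Decidable (Spec_singleAreaConnectivitySingle currProjection a out) := by unfold Spec_singleAreaConnectivitySingle; infer_instance

-- ===== CLAIM (what is proved, stated in full; the proofs are below) =====
def Claim_equal_singleAreaConnectivitySingle : Prop := ∀ (currProjection : List Int) (a : List (List Int)), Dom_singleAreaConnectivitySingle currProjection a → Spec_singleAreaConnectivitySingle currProjection a (singleAreaConnectivitySingle currProjection a)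

-- ===== LEMMAS AND PROOFS =====

-- inner loop of the index build: membership in the set stored at v
theorem pv_mem_regionFold (region : List Int) (s : Int) (d : PySem.Dict Int (PySem.Set Int)) (v j : Int) :
    j ∈ (region.foldl (fun d w => d.insert w (PySem.Set.add (d.getD w PySem.Set.empty) s)) d).getD v PySem.Set.empty
      ↔ j ∈ d.getD v PySem.Set.empty ∨ (v ∈ region ∧ j = s) := by
  induction region generalizing d with
  | nil => simp
  | cons w ws ih =>
    simp only [List.foldl_cons, ih, PySem.Dict.getD_insert]
    by_cases h : v = w
    · subst h; simp [PySem.Set.mem_add]; tauto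
    · simp [h]

-- the inverted index: j is recorded at v iff region j contains v
theorem pv_mem_buildIndex_aux (l : List (List Int)) (s : Int) (d : PySem.Dict Int (PySem.Set Int)) (v j : Int) :
    j ∈ ((PySem.List.enumerate l s).foldl (fun d p =>
        p.2.foldl (fun d w => d.insert w (PySem.Set.add (d.getD w PySem.Set.empty) p.1)) d) d).getD v PySem.Set.empty
      ↔ j ∈ d.getD v PySem.Set.empty ∨ ∃ (k : Nat), ∃ (hk : k < l.length), j = s + k ∧ v ∈ l[k] := by
  induction l generalizing s d with
  | nil => simp [PySem.List.enumerate_nil]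
  | cons x xs ih =>
    rw [PySem.List.enumerate_cons]
    simp only [List.foldl_cons, ih, pv_mem_regionFold]
    constructor
    · rintro (⟨h | ⟨hv, hj⟩⟩ | ⟨k, hk, hj, hv⟩)
      · exact Or.inl h
      · exact Or.inr ⟨0, by simp, by simpa using hj, by simpa using hv⟩
      · exact Or.inr ⟨k + 1, by simpa using hk, by push_cast at hj ⊢; omega, by simpa using hv⟩
    · rintro (h | ⟨k, hk, hj, hv⟩)
      · exact Or.inl (Or.inl h)
      · match k with
        | 0 => exact Or.inl (Or.inr ⟨by simpa using hv, by simpa using hj⟩)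
        | k + 1 => exact Or.inr ⟨k, by simpa using hk, by push_cast at hj ⊢; omega, by simpa using hv⟩

theorem pv_mem_buildIndex (a : List (List Int)) (v j : Int) :
    j ∈ (pvBuildIndex a).getD v PySem.Set.empty
      ↔ ∃ (k : Nat), ∃ (hk : k < a.length), j = (k : Int) ∧ v ∈ a[k] := by
  have := pv_mem_buildIndex_aux a 0 PySem.Dict.empty v j
  simpa [pvBuildIndex] using this

-- the scatter loop: setting row[j] := 1 for each j in S
theorem pv_scatter_get (S : List Int) (init : List Int)
    (hS : ∀ j ∈ S, 0 ≤ j ∧ j.toNat < init.length) (m : Nat) :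
    (S.foldl (fun row j => PySem.List.pySetD row j 1) init)[m]?
      = if (m : Int) ∈ S then some 1 else init[m]? := by
  induction S generalizing init with
  | nil => simp
  | cons j js ih =>
    obtain ⟨hj, hjlt⟩ := hS j (List.mem_cons_self)
    rw [List.foldl_cons, PySem.List.pySetD_of_nonneg init 1 hj,
      ih (init.set j.toNat 1) (by intro x hx; simpa using hS x (List.mem_cons_of_mem _ hx))]
    by_cases hmem : (m : Int) ∈ js
    · rw [if_pos hmem, if_pos (List.mem_cons_of_mem _ hmem)]
    · rw [if_neg hmem]
      by_cases hme : (m : Int) = j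
      · have h1 : j.toNat = m := by omega
        have hmlt : m < init.length := h1 ▸ hjlt
        rw [if_pos (by simp [hme])]
        simp [h1, hmlt]
      · have h1 : ¬ (j.toNat = m) := by omega
        rw [if_neg (by simp [hme, hmem])]
        simp [h1]

-- A's row as a map over the regions
theorem pv_rowA_eq_map (a : List (List Int)) (v : Int) :
    (PySem.List.pyRange 0 (a.length : Int) 1).foldl
      (fun sn j => if v ∈ PySem.List.pyGetD a j [] then sn ++ [(1 : Int)] else sn ++ [(0 : Int)]) []
      = a.map (fun aj => if v ∈ aj then 1 else 0) := by
  rw [PySem.List.foldl_pyRange_zero_pyGetD' a [] (fun sn w => if v ∈ w then sn ++ [(1 : Int)] else sn ++ [(0 : Int)]) []]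
  have h : (fun (sn : List Int) (w : List Int) => if v ∈ w then sn ++ [(1 : Int)] else sn ++ [(0 : Int)])
      = fun sn w => sn ++ [if v ∈ w then (1 : Int) else 0] := by
    funext sn w; split <;> rfl
  rw [h, PySem.List.foldl_append_singleton_eq_map]
  simp

-- B's row equals A's row
theorem pv_row_eq (a : List (List Int)) (v : Int) :
    ((pvBuildIndex a).getD v PySem.Set.empty).foldl
        (fun row j => PySem.List.pySetD row j 1) (List.replicate a.length (0 : Int))
      = a.map (fun aj => if v ∈ aj then 1 else 0) := by
  have hS : ∀ j ∈ (pvBuildIndex a).getD v PySem.Set.empty,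
      0 ≤ j ∧ j.toNat < (List.replicate a.length (0 : Int)).length := by
    intro j hj
    obtain ⟨k, hk, hj', _⟩ := (pv_mem_buildIndex a v j).1 hj
    subst hj'; simp; omega
  apply List.ext_getElem?
  intro m
  rw [pv_scatter_get _ _ hS m, List.getElem?_map]
  by_cases hm : m < a.length
  · by_cases hv : v ∈ a[m]
    · have hmem : (m : Int) ∈ (pvBuildIndex a).getD v PySem.Set.empty :=
        (pv_mem_buildIndex a v (m : Int)).2 ⟨m, hm, rfl, hv⟩
      rw [if_pos hmem]
      simp [List.getElem?_eq_getElem hm, hv]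
    · have hmem : (m : Int) ∉ (pvBuildIndex a).getD v PySem.Set.empty := by
        intro hmem
        obtain ⟨k, hk, he, hvk⟩ := (pv_mem_buildIndex a v (m : Int)).1 hmem
        have : k = m := by omega
        exact hv (this ▸ hvk)
      rw [if_neg hmem]
      simp [hv, hm]
  · have hmem : (m : Int) ∉ (pvBuildIndex a).getD v PySem.Set.empty := by
      intro hmem
      obtain ⟨k, hk, he, _⟩ := (pv_mem_buildIndex a v (m : Int)).1 hmem
      omega
    rw [if_neg hmem]
    simp [hm]

-- ===== VERDICT (by name: the statement is the Claim_ definition above) =====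
theorem singleAreaConnectivitySingle_spec : Claim_equal_singleAreaConnectivitySingle := by
  intro cp a _
  unfold Spec_singleAreaConnectivitySingle singleAreaConnectivitySingle singleAreaConnectivitySingle_alt
  rw [PySem.List.foldl_pyRange_zero_pyGetD' cp (0 : Int)
    (fun total v =>
      total ++ [(PySem.List.pyRange 0 (a.length : Int) 1).foldl
        (fun sn j => if v ∈ PySem.List.pyGetD a j [] then sn ++ [(1 : Int)] else sn ++ [(0 : Int)]) []]) []]
  rw [PySem.List.foldl_append_singleton_eq_map, PySem.List.foldl_append_singleton_eq_map]
  simp only [List.nil_append]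
  apply List.map_congr_left
  intro v _
  rw [pv_rowA_eq_map, pv_row_eq]
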